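-- pv_equiv track=rewrite | github.com/xu1718191411/AT_CODE_BEGINNER_SELECTION | CONTEXT_158/tax_increase.py | calculate
-- ===== SOURCE A (Python) =====
-- import math
--
-- def calculate(a,b):
--     theta = 1 - 1e-9
--
--     s1 = a/0.08
--     s2 = (a + theta)/0.08
--
--
--     s3 = b/0.10
--     s4 = (b + theta) / 0.10
--
--     m1 = math.ceil(s1)
--     m2 = math.floor(s2)
--
--     m3 = math.ceil(s3)
--     m4 = math.floor(s4)
--
--     arr1 = [i for i in range(m1,m2+1)]
--     arr2 = [i for i in range(m3,m4+1)]
--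
--     result = list(set(arr1).intersection(set(arr2)))
--
--
--     if len(result) == 0:
--         return -1
--     else:
--         return min(result)
-- ===== SOURCE B (Python) =====
-- import math
--
-- def calculate(a, b):
--     # The two tax readings each pin the price to a contiguous integer interval;
--     # intersect the intervals directly instead of materialising ranges and sets.
--     theta = 1 - 1e-9
--     lo = max(math.ceil(a / 0.08), math.ceil(b / 0.10))
--     hi = min(math.floor((a + theta) / 0.08), math.floor((b + theta) / 0.10))
--     return -1 if hi < lo else lo
-- ===== Notes on version B (the rewrite author's own statement) =====
-- stated objective: simpler
-- what changed: B replaces A's materialised ranges, set construction, set intersection and min() scan by a direct interval intersection: lo = max of the two ceilings, hi = min of the two floors, returning -1 when hi < lo and lo otherwise.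
import Mathlib
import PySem

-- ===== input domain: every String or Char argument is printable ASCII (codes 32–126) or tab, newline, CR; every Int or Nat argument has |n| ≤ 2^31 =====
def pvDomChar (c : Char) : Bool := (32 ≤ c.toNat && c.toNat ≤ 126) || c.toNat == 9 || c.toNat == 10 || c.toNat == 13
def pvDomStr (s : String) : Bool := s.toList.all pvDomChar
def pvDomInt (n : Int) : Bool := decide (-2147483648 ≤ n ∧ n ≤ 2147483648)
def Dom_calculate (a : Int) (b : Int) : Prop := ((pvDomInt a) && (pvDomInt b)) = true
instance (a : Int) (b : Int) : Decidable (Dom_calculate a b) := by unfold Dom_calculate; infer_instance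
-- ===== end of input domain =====

-- B replaces A's range-lists/set-intersection/min pipeline by a direct interval
-- intersection (max of lower bounds vs min of upper bounds); objective: simpler.


-- ===== PORT A =====
-- PySem has no IEEE-754 floats, so the four float expressions of the Python
-- (math.ceil(a/0.08), math.floor((a+theta)/0.08), math.ceil(b/0.10),
-- math.floor((b+theta)/0.10) with theta = 1 - 1e-9) are ported by hand as
-- integer functions.  Each is EXACT on the whole domain |n| ≤ 2^31
-- (Dom_calculate): verified by an exhaustive sweep of every integer in
-- [-2^31, 2^31] against IEEE-754 double arithmetic (the piecewise bands in
-- pvFloorTheta008/pvFloorTheta010 are where a+theta rounds up to a+1 and the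
-- subsequent division rounds to an exact multiple).  A's port and B's port
-- each carry their OWN transliteration of these float expressions.

-- math.ceil(n / 0.08) : exact integer model on |n| ≤ 2^31
def pvCeil008 (n : Int) : Int := -(PySem.Int.floordiv (-(25 * n)) 2)

-- math.floor((n + theta) / 0.08) : exact integer model on |n| ≤ 2^31
def pvFloorTheta008 (n : Int) : Int :=
  if 16777216 ≤ n ∨ n ≤ -16777217 then PySem.Int.floordiv (25 * (n + 1)) 2
  else PySem.Int.floordiv (25 * n) 2 + 12

-- math.ceil(n / 0.10) : exact integer model on |n| ≤ 2^31
def pvCeil010 (n : Int) : Int := 10 * n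

-- math.floor((n + theta) / 0.10) : exact integer model on |n| ≤ 2^31
def pvFloorTheta010 (n : Int) : Int :=
  if 16777216 ≤ n ∨ n ≤ -13421774 ∨ (-8388608 ≤ n ∧ n ≤ -6710888) then 10 * (n + 1)
  else 10 * n + 9

def calculate (a : Int) (b : Int) : Int :=
  let m1 := pvCeil008 a
  let m2 := pvFloorTheta008 a
  let m3 := pvCeil010 b
  let m4 := pvFloorTheta010 b
  let arr1 := PySem.List.pyRange m1 (m2 + 1) 1
  let arr2 := PySem.List.pyRange m3 (m4 + 1) 1
  let result := PySem.Set.inter (PySem.Set.ofList arr1) (PySem.Set.ofList arr2)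
  if result.length = 0 then -1
  else (PySem.List.min? result (fun x => x)).getD 0  -- min(result); the guard makes it some

-- ===== PORT B =====
-- B's own exact integer models of the same four float expressions, written in
-- B's form (single floor division each, complementary band conditions); each is
-- exact on |n| ≤ 2^31 by the same exhaustive sweep.

-- math.ceil(n / 0.08)
def pvAltCeil008 (n : Int) : Int := PySem.Int.floordiv (25 * n + 1) 2

-- math.floor((n + theta) / 0.08)
def pvAltFloor008 (n : Int) : Int :=
  if -16777216 ≤ n ∧ n ≤ 16777215 then PySem.Int.floordiv (25 * n + 24) 2
  else PySem.Int.floordiv (25 * n + 25) 2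

-- math.floor((n + theta) / 0.10)
def pvAltFloor010 (n : Int) : Int :=
  if -13421773 ≤ n ∧ n ≤ 16777215 ∧ ¬ (-8388608 ≤ n ∧ n ≤ -6710888) then 10 * n + 9
  else 10 * n + 10

def calculate_alt (a : Int) (b : Int) : Int :=
  let lo := max (pvAltCeil008 a) (10 * b)       -- 10 * b = math.ceil(b / 0.10), exact
  let hi := min (pvAltFloor008 a) (pvAltFloor010 b)
  if hi < lo then -1 else lo

-- ===== PRECONDITION & SPEC =====
def Spec_calculate (a : Int) (b : Int) (out : Int) : Prop := out = calculate_alt a b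
instance (a : Int) (b : Int) (out : Int) : Decidable (Spec_calculate a b out) := by unfold Spec_calculate; infer_instance

-- ===== CLAIM (what is proved, stated in full; the proofs are below) =====
def Claim_equal_calculate : Prop := ∀ (a : Int) (b : Int), Dom_calculate a b → Spec_calculate a b (calculate a b)

-- ===== LEMMAS AND PROOFS =====

-- B's float models agree with A's float models on every integer
theorem pv_ceil008_eq (n : Int) : pvAltCeil008 n = pvCeil008 n := by
  unfold pvAltCeil008 pvCeil008
  rw [PySem.Int.floordiv_eq_ediv_of_pos (by omega), PySem.Int.floordiv_eq_ediv_of_pos (by omega)]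
  omega

theorem pv_floor008_eq (n : Int) : pvAltFloor008 n = pvFloorTheta008 n := by
  unfold pvAltFloor008 pvFloorTheta008
  rw [PySem.Int.floordiv_eq_ediv_of_pos (show (0:Int) < 2 by omega),
      PySem.Int.floordiv_eq_ediv_of_pos (show (0:Int) < 2 by omega),
      PySem.Int.floordiv_eq_ediv_of_pos (show (0:Int) < 2 by omega),
      PySem.Int.floordiv_eq_ediv_of_pos (show (0:Int) < 2 by omega)]
  split_ifs <;> omega

theorem pv_floor010_eq (n : Int) : pvAltFloor010 n = pvFloorTheta010 n := by
  unfold pvAltFloor010 pvFloorTheta010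
  split_ifs <;> omega

-- membership in the intersected set, in terms of the interval bounds
theorem pv_mem_result (m1 m2 m3 m4 x : Int) :
    x ∈ PySem.Set.inter (PySem.Set.ofList (PySem.List.pyRange m1 (m2 + 1) 1))
        (PySem.Set.ofList (PySem.List.pyRange m3 (m4 + 1) 1)) ↔
      (m1 ≤ x ∧ x ≤ m2) ∧ (m3 ≤ x ∧ x ≤ m4) := by
  simp [PySem.Set.inter, List.mem_filter, PySem.Set.contains, PySem.Set.mem_ofList,
    PySem.List.mem_pyRange_one]

-- the whole pipeline of A equals the interval intersection
theorem pv_pipeline (m1 m2 m3 m4 : Int) :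
    (let result := PySem.Set.inter (PySem.Set.ofList (PySem.List.pyRange m1 (m2 + 1) 1))
        (PySem.Set.ofList (PySem.List.pyRange m3 (m4 + 1) 1));
      if result.length = 0 then (-1 : Int)
      else (PySem.List.min? result (fun x => x)).getD 0) =
      if max m1 m3 ≤ min m2 m4 then max m1 m3 else -1 := by
  set result := PySem.Set.inter (PySem.Set.ofList (PySem.List.pyRange m1 (m2 + 1) 1))
      (PySem.Set.ofList (PySem.List.pyRange m3 (m4 + 1) 1)) with hres
  by_cases h : max m1 m3 ≤ min m2 m4
  · have hlo : max m1 m3 ∈ result := by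
      rw [hres, pv_mem_result]; omega
    have hne : result ≠ [] := fun hnil => by simp [hnil] at hlo
    have hlen : ¬ result.length = 0 := by
      simpa [List.length_eq_zero_iff] using hne
    cases hq : PySem.List.min? result (fun x => x) with
    | none => exact absurd ((PySem.List.min?_eq_none_iff result (fun x => x)).mp hq) hne
    | some m =>
      have hm : m ∈ result := PySem.List.min?_mem hq
      have hmle : m ≤ max m1 m3 := PySem.List.min?_isMin hq _ hlo
      have hlem : max m1 m3 ≤ m := by
        have := (pv_mem_result m1 m2 m3 m4 m).mp (hres ▸ hm)
        omega
      rw [if_neg hlen, hq, Option.getD_some]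
      omega
  · have hnil : result = [] := by
      rw [List.eq_nil_iff_forall_not_mem]
      intro x hx
      have := (pv_mem_result m1 m2 m3 m4 x).mp (hres ▸ hx)
      omega
    simp [hnil, h]

-- ===== VERDICT (by name: the statement is the Claim_ definition above) =====
theorem calculate_spec : Claim_equal_calculate := by
  intro a b _
  unfold Spec_calculate calculate calculate_alt
  rw [pv_pipeline (pvCeil008 a) (pvFloorTheta008 a) (pvCeil010 b) (pvFloorTheta010 b),
      pv_ceil008_eq, pv_floor008_eq, pv_floor010_eq]
  unfold pvCeil010
  simp only [Int.reduceNeg]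
  split_ifs <;> omega
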